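-- pv_equiv track=rewrite | github.com/milkrong/Basic-Python-DS-Algs | googleOA/coupon.py | buy_coupons
-- ===== SOURCE A (Python) =====
-- def buy_coupons(coupons):
--     cp_dict = {}
--     min_coup = len(coupons) + 1
--     for i, v in enumerate(coupons):
--         if v in cp_dict.keys():
--             min_coup = min(min_coup, i - cp_dict[v] + 1)
--         else:
--             cp_dict[v] = i
--
--     return min_coup if min_coup < len(coupons) + 1 else -1
-- ===== SOURCE B (Python) =====
-- def buy_coupons(coupons):
--     positions = {}
--     for i, v in enumerate(coupons):
--         positions.setdefault(v, []).append(i)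
--     best = -1
--     for ps in positions.values():
--         if len(ps) >= 2:
--             span = ps[1] - ps[0] + 1
--             if best == -1 or span < best:
--                 best = span
--     return best
-- ===== Notes on version B (the rewrite author's own statement) =====
-- stated objective: alternative
-- what changed: Replaces the single-pass running-minimum with two distinct phases: first build an index table mapping each value to the list of all its positions, then reduce over the groups taking the span from the first two recorded positions of each duplicated value, with a sentinel-free default for the no-duplicate case.
import Mathlib
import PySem

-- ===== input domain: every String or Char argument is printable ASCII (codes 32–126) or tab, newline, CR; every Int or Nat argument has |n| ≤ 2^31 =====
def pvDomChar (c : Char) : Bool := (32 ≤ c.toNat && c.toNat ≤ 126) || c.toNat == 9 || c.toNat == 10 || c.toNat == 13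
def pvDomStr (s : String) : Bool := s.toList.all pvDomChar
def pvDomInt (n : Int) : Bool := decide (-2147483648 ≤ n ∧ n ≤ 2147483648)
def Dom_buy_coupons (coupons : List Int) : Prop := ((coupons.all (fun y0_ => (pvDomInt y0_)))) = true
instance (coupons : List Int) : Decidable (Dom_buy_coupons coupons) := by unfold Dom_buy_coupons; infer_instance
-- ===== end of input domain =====

-- B replaces A's single-pass running minimum by two phases (value → index-list table, then a reduce over
-- the groups); same O(n) asymptotics, alternative structure at the same O(n) cost.

-- ===== PORT A =====
-- loop body of A; the membership test 'v in cp_dict.keys()' plus the lookup 'cp_dict[v]' (in range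
-- exactly when the test succeeds) are ported as one get? match
def buyStepA (st : PySem.Dict Int Int × Int) (p : Int × Int) : PySem.Dict Int Int × Int :=
  match st.1.get? p.2 with
  | some j => (st.1, min st.2 (p.1 - j + 1))
  | none   => (st.1.insert p.2 p.1, st.2)

def buy_coupons (coupons : List Int) : Int :=
  let st := (PySem.List.enumerate coupons 0).foldl buyStepA
    (PySem.Dict.empty, (coupons.length : Int) + 1)
  if st.2 < (coupons.length : Int) + 1 then st.2 else -1

-- ===== PORT B =====
-- phase 1 of B: positions.setdefault(v, []).append(i)
def buildPositions (coupons : List Int) : PySem.Dict Int (List Int) :=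
  (PySem.List.enumerate coupons 0).foldl
    (fun t p => t.modify p.2 [] (fun l => l ++ [p.1])) PySem.Dict.empty

-- phase 2 loop body of B (ps[1]/ps[0] are in range under the length guard)
def buyStepB (best : Int) (ps : List Int) : Int :=
  if ps.length ≥ 2 then
    let span := PySem.List.pyGetD ps 1 0 - PySem.List.pyGetD ps 0 0 + 1
    if best = -1 ∨ span < best then span else best
  else best

def buy_coupons_alt (coupons : List Int) : Int :=
  ((buildPositions coupons).values).foldl buyStepB (-1)

-- ===== PRECONDITION & SPEC =====
def Spec_buy_coupons (coupons : List Int) (out : Int) : Prop := out = buy_coupons_alt coupons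
instance (coupons : List Int) (out : Int) : Decidable (Spec_buy_coupons coupons out) := by unfold Spec_buy_coupons; infer_instance

-- ===== CLAIM (what is proved, stated in full; the proofs are below) =====
def Claim_equal_buy_coupons : Prop := ∀ (coupons : List Int), Dom_buy_coupons coupons → Spec_buy_coupons coupons (buy_coupons coupons)

-- ===== LEMMAS AND PROOFS =====

-- indices (0-based) at which v occurs in xs
def pvIdxs (xs : List Int) (v : Int) : List Int :=
  ((PySem.List.enumerate xs 0).filter (fun p => p.2 == v)).map (·.1)

-- span of a group: second - first + 1, defined iff the group has ≥ 2 members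
def pvSpan? (l : List Int) : Option Int :=
  match l with
  | a :: b :: _ => some (b - a + 1)
  | _ => none

-- the spans, one per duplicated value, in first-occurrence order
def pvSpans (xs : List Int) : List Int :=
  (PySem.Set.ofList xs).filterMap (fun v => pvSpan? (pvIdxs xs v))

lemma pvIdxs_append (xs : List Int) (x v : Int) :
    pvIdxs (xs ++ [x]) v = pvIdxs xs v ++ (if v = x then [(xs.length : Int)] else []) := by
  unfold pvIdxs
  rw [PySem.List.enumerate_append, List.filter_append, List.map_append]
  congr 1
  simp [PySem.List.enumerate, List.filter]
  split_ifs with h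
  · simp [h]
  · have : (x == v) = false := by simp [Ne.symm h]
    simp [this]

lemma pvIdxs_nil_iff (xs : List Int) (v : Int) : pvIdxs xs v = [] ↔ v ∉ xs := by
  unfold pvIdxs
  rw [List.map_eq_nil_iff, List.filter_eq_nil_iff]
  constructor
  · intro h hv
    obtain ⟨k, hk, rfl⟩ := List.mem_iff_getElem.mp hv
    have : ((0 : Int) + k, xs[k]) ∈ PySem.List.enumerate xs 0 := by
      rw [PySem.List.mem_enumerate_iff]; exact ⟨k, hk, rfl⟩
    simpa using h _ this
  · intro hv p hp
    rw [PySem.List.mem_enumerate_iff] at hp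
    obtain ⟨k, hk, rfl⟩ := hp
    simp only [beq_iff_eq]
    intro h; exact hv (h ▸ List.getElem_mem hk)

lemma pvIdxs_mem_bounds (xs : List Int) (v : Int) :
    ∀ j ∈ pvIdxs xs v, 0 ≤ j ∧ j < (xs.length : Int) := by
  intro j hj
  unfold pvIdxs at hj
  obtain ⟨p, hp, rfl⟩ := List.mem_map.mp hj
  have := List.mem_of_mem_filter hp
  rw [PySem.List.mem_enumerate_iff] at this
  obtain ⟨k, hk, rfl⟩ := this
  simp; omega

lemma pvIdxs_pairwise (xs : List Int) (v : Int) : (pvIdxs xs v).Pairwise (· < ·) := by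
  unfold pvIdxs
  refine List.Pairwise.map _ (fun p q h => h) ?_
  exact (PySem.List.pairwise_lt_enumerate xs 0).filter _

lemma pvSpans_bounds (xs : List Int) :
    ∀ s ∈ pvSpans xs, 1 ≤ s ∧ s ≤ (xs.length : Int) := by
  intro s hs
  unfold pvSpans at hs
  obtain ⟨v, -, hv⟩ := List.mem_filterMap.mp hs
  unfold pvSpan? at hv
  match h : pvIdxs xs v with
  | [] => rw [h] at hv; simp at hv
  | [a] => rw [h] at hv; simp at hv
  | a :: b :: t =>
    rw [h] at hv
    simp only [Option.some.injEq] at hv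
    have hab : a < b := by
      have := pvIdxs_pairwise xs v
      rw [h] at this
      exact (List.pairwise_cons.mp this).1 b (by simp)
    have hb := pvIdxs_mem_bounds xs v b (by rw [h]; simp)
    have ha := pvIdxs_mem_bounds xs v a (by rw [h]; simp)
    omega

-- folding min is insensitive to pulling one element out
lemma foldl_min_out (Q : List Int) (c s : Int) :
    Q.foldl min (min c s) = min (Q.foldl min c) s := by
  induction Q generalizing c with
  | nil => rfl
  | cons h t ih =>
    simp only [List.foldl_cons]
    rw [min_right_comm c s h, ih]

-- A's loop, characterized: the dict holds first positions, the min slot holds foldl min over pvSpans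
lemma A_fold (xs : List Int) (m0 : Int) :
    ∃ d : PySem.Dict Int Int,
      (PySem.List.enumerate xs 0).foldl buyStepA (PySem.Dict.empty, m0)
        = (d, (pvSpans xs).foldl min m0)
      ∧ ∀ v, d.get? v = (pvIdxs xs v).head? := by
  induction xs using List.reverseRecOn with
  | nil =>
    refine ⟨PySem.Dict.empty, ?_, ?_⟩
    · simp [PySem.List.enumerate, pvSpans, PySem.Set.ofList]
    · intro v
      simp [PySem.Dict.get?_empty, pvIdxs, PySem.List.enumerate]
  | append_singleton xs x ih =>
    obtain ⟨d, hf, hd⟩ := ih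
    rw [PySem.List.enumerate_append, List.foldl_append, hf]
    have henum1 : PySem.List.enumerate [x] (0 + (xs.length : Int)) = [((xs.length : Int), x)] := by
      simp [PySem.List.enumerate]
    rw [henum1]
    simp only [List.foldl_cons, List.foldl_nil]
    cases hx : d.get? x with
    | none =>
      -- first occurrence of x: the dict gains it, no span changes
      have hnil : pvIdxs xs x = [] := by
        have := hd x; rw [hx] at this; exact List.head?_eq_none_iff.mp this.symm
      have hxmem : x ∉ xs := (pvIdxs_nil_iff xs x).mp hnil
      have hstep : buyStepA (d, (pvSpans xs).foldl min m0) ((xs.length : Int), x)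
          = (d.insert x (xs.length : Int), (pvSpans xs).foldl min m0) := by
        unfold buyStepA; rw [hx]
      rw [hstep]
      have hspans : pvSpans (xs ++ [x]) = pvSpans xs := by
        unfold pvSpans
        rw [PySem.Set.ofList_append_singleton]
        rw [PySem.Set.add, if_neg (by simp [hxmem])]
        rw [List.filterMap_append]
        have hat : List.filterMap (fun v => pvSpan? (pvIdxs (xs ++ [x]) v)) [x] = [] := by
          simp only [List.filterMap_cons, List.filterMap_nil]
          rw [pvIdxs_append, hnil, if_pos rfl]
          rfl
        rw [hat, List.append_nil]
        apply List.filterMap_congr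
        intro v hv
        have hvx : v ≠ x := fun h => hxmem (h ▸ (PySem.Set.mem_ofList xs v).mp hv)
        rw [pvIdxs_append, if_neg hvx, List.append_nil]
      rw [hspans]
      refine ⟨_, rfl, ?_⟩
      intro v
      rw [PySem.Dict.get?_insert]
      by_cases hvx : v = x
      · subst hvx
        rw [if_pos rfl, pvIdxs_append, if_pos rfl, hnil]
        rfl
      · rw [if_neg hvx, hd v, pvIdxs_append, if_neg hvx, List.append_nil]
    | some a =>
      have hcons : ∃ rest, pvIdxs xs x = a :: rest := by
        have := hd x; rw [hx] at this
        cases h : pvIdxs xs x with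
        | nil => rw [h] at this; simp at this
        | cons a' r => rw [h] at this; simp at this; exact ⟨r, by rw [this]⟩
      obtain ⟨rest, hrest⟩ := hcons
      have hxmem : x ∈ xs := by
        by_contra hmem
        rw [(pvIdxs_nil_iff xs x).mpr hmem] at hrest; simp at hrest
      have hstep : buyStepA (d, (pvSpans xs).foldl min m0) ((xs.length : Int), x)
          = (d, min ((pvSpans xs).foldl min m0) ((xs.length : Int) - a + 1)) := by
        unfold buyStepA; rw [hx]
      rw [hstep]
      have hidx : pvIdxs (xs ++ [x]) x = a :: (rest ++ [(xs.length : Int)]) := by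
        rw [pvIdxs_append, if_pos rfl, hrest]; rfl
      have hofl : PySem.Set.ofList (xs ++ [x]) = PySem.Set.ofList xs := by
        rw [PySem.Set.ofList_append_singleton, PySem.Set.add, if_pos]
        simp only [PySem.Set.contains]
        simpa [List.contains_iff_mem, PySem.Set.mem_ofList] using hxmem
      have hdpart : ∀ v, d.get? v = (pvIdxs (xs ++ [x]) v).head? := by
        intro v
        by_cases hvx : v = x
        · subst hvx; rw [hidx, hx]; rfl
        · rw [hd v, pvIdxs_append, if_neg hvx, List.append_nil]
      cases rest with
      | nil =>
        -- exactly one earlier occurrence of x: a new span appears in x's slot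
        obtain ⟨p, q, hsplit⟩ := List.append_of_mem ((PySem.Set.mem_ofList xs x).mpr hxmem)
        have hnd := PySem.Set.nodup_ofList xs
        rw [hsplit] at hnd
        have hndp := List.nodup_append.mp hnd
        have hxq : x ∉ q := by
          have := hndp.2.1; simp [List.nodup_cons] at this; exact this.1
        have hxp : x ∉ p := fun h => hndp.2.2 x h x (by simp) rfl
        refine ⟨d, ?_, hdpart⟩
        have hfx' : pvSpan? (pvIdxs (xs ++ [x]) x) = some ((xs.length : Int) - a + 1) := by
          rw [hidx]; rfl
        have hfx : pvSpan? (pvIdxs xs x) = none := by rw [hrest]; rfl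
        have hcongr : ∀ l : List Int, x ∉ l →
            l.filterMap (fun v => pvSpan? (pvIdxs (xs ++ [x]) v))
              = l.filterMap (fun v => pvSpan? (pvIdxs xs v)) := by
          intro l hl
          apply List.filterMap_congr
          intro v hv
          rw [pvIdxs_append, if_neg (fun h => hl (by rw [← h]; exact hv)), List.append_nil]
        have hnew : pvSpans (xs ++ [x])
            = (p.filterMap (fun v => pvSpan? (pvIdxs xs v)))
              ++ ((xs.length : Int) - a + 1)
              :: (q.filterMap (fun v => pvSpan? (pvIdxs xs v))) := by
          unfold pvSpans
          rw [hofl, hsplit, List.filterMap_append, List.filterMap_cons, hfx',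
            hcongr p hxp, hcongr q hxq]
        have hold : pvSpans xs
            = (p.filterMap (fun v => pvSpan? (pvIdxs xs v)))
              ++ (q.filterMap (fun v => pvSpan? (pvIdxs xs v))) := by
          unfold pvSpans
          rw [hsplit, List.filterMap_append, List.filterMap_cons, hfx]
        rw [hnew, hold]
        simp only [List.foldl_append, List.foldl_cons]
        rw [foldl_min_out]
      | cons b rest' =>
        -- x already had ≥ 2 occurrences: spans unchanged and the new candidate is no smaller
        have hspans : pvSpans (xs ++ [x]) = pvSpans xs := by
          unfold pvSpans
          rw [hofl]
          apply List.filterMap_congr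
          intro v hv
          by_cases hvx : v = x
          · subst hvx
            rw [hidx, hrest]; rfl
          · rw [pvIdxs_append, if_neg hvx, List.append_nil]
        have hs0 : (b - a + 1) ∈ pvSpans xs := by
          apply List.mem_filterMap.mpr
          exact ⟨x, (PySem.Set.mem_ofList xs x).mpr hxmem, by rw [hrest]; rfl⟩
        have hM := (PySem.List.foldl_min_le (pvSpans xs) m0).2 _ hs0
        have hb := pvIdxs_mem_bounds xs x b (by rw [hrest]; simp)
        have hmin : min ((pvSpans xs).foldl min m0) ((xs.length : Int) - a + 1)
            = (pvSpans xs).foldl min m0 := by omega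
        rw [hmin, hspans]
        exact ⟨d, rfl, hdpart⟩

-- B's table, characterized
lemma build_getD_aux (l : List (Int × Int)) (d : PySem.Dict Int (List Int)) (c : Int) :
    (l.foldl (fun t p => t.modify p.2 [] (fun l => l ++ [p.1])) d).getD c []
      = d.getD c [] ++ (l.filter (fun p => p.2 == c)).map (·.1) := by
  induction l generalizing d with
  | nil => simp
  | cons p t ih =>
    simp only [List.foldl_cons, ih, List.filter_cons]
    rw [PySem.Dict.getD_modify]
    by_cases h : c = p.2
    · simp [h]
    · have : (p.2 == c) = false := by simp [Ne.symm h]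
      simp [h, this]

lemma build_getD (xs : List Int) (c : Int) :
    (buildPositions xs).getD c [] = pvIdxs xs c := by
  unfold buildPositions pvIdxs
  rw [build_getD_aux]
  simp

lemma build_values (xs : List Int) :
    (buildPositions xs).values = (PySem.Set.ofList xs).map (fun v => pvIdxs xs v) := by
  have hnd : (buildPositions xs).keys.Nodup := by
    unfold buildPositions
    exact PySem.Dict.nodup_keys_foldl_modify_key (PySem.List.enumerate xs 0) (fun p => p.2) []
      (fun t p l => l ++ [p.1]) PySem.Dict.empty PySem.Dict.nodup_keys_empty
  have hk : (buildPositions xs).keys = PySem.Set.ofList xs := by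
    unfold buildPositions
    rw [PySem.Dict.keys_foldl_modify_key]
    simp [PySem.List.map_snd_enumerate, PySem.Dict.keys_empty, PySem.Set.update,
      PySem.Set.ofList_eq_foldl]
  rw [PySem.Dict.values_eq_map_keys _ hnd [], hk]
  exact List.map_congr_left (fun v _ => build_getD xs v)

-- B's reduce over the groups = the -1-flavoured running minimum over pvSpans
lemma B_eq_spans (xs : List Int) :
    buy_coupons_alt xs
      = (pvSpans xs).foldl (fun b s => if b = -1 ∨ s < b then s else b) (-1) := by
  unfold buy_coupons_alt pvSpans
  rw [build_values, List.foldl_map, List.foldl_filterMap]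
  apply PySem.List.foldl_congr_mem
  intro acc v _
  unfold buyStepB pvSpan?
  match h : pvIdxs xs v with
  | [] => simp
  | [a] => simp
  | a :: b :: t =>
    have hlen : (a :: b :: t).length ≥ 2 := by simp
    simp only [if_pos hlen]
    have h1 : PySem.List.pyGetD (a :: b :: t) 1 0 = b := by simp [PySem.List.pyGetD]
    have h0 : PySem.List.pyGetD (a :: b :: t) 0 0 = a := by simp [PySem.List.pyGetD]
    rw [h1, h0]

lemma step2_eq_min (t : List Int) (b : Int) (hb : 1 ≤ b) (ht : ∀ s ∈ t, 1 ≤ s) :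
    t.foldl (fun b s => if b = -1 ∨ s < b then s else b) b = t.foldl min b := by
  induction t generalizing b with
  | nil => rfl
  | cons h t ih =>
    simp only [List.foldl_cons]
    have h1 : 1 ≤ h := ht h (by simp)
    have : (if b = -1 ∨ h < b then h else b) = min b h := by
      split_ifs with hc
      · rcases hc with hc | hc
        · omega
        · omega
      · rw [not_or, not_lt] at hc; omega
    rw [this]
    exact ih (min b h) (le_min hb h1) (fun s hs => ht s (by simp [hs]))

-- A's sentinel-vs-(-1) epilogue agrees with B's -1-flavoured minimum
lemma final_eq (sp : List Int) (N : Int) (h : ∀ s ∈ sp, 1 ≤ s ∧ s ≤ N) :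
    (if sp.foldl min (N + 1) < N + 1 then sp.foldl min (N + 1) else -1)
      = sp.foldl (fun b s => if b = -1 ∨ s < b then s else b) (-1) := by
  cases sp with
  | nil => simp
  | cons s t =>
    have hs := h s (by simp)
    have ht : ∀ u ∈ t, 1 ≤ u ∧ u ≤ N := fun u hu => h u (by simp [hu])
    simp only [List.foldl_cons]
    have h1 : min (N + 1) s = s := by omega
    rw [h1]
    simp only [true_or, if_true]
    rw [step2_eq_min t s hs.1 (fun u hu => (ht u hu).1)]
    have h3 : t.foldl min s ≤ s := (PySem.List.foldl_min_le t s).1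
    rw [if_pos (by omega)]

-- ===== VERDICT (by name: the statement is the Claim_ definition above) =====
theorem buy_coupons_spec : Claim_equal_buy_coupons := by
  intro coupons _
  unfold Spec_buy_coupons
  obtain ⟨d, hfold, -⟩ := A_fold coupons ((coupons.length : Int) + 1)
  show buy_coupons coupons = _
  rw [buy_coupons, hfold, B_eq_spans]
  exact final_eq _ _ (pvSpans_bounds coupons)
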